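-- pv_equiv track=rewrite | github.com/kristopher-miles/threadspeak-audiobook | app/script_repair.py | _find_clean_start
-- ===== SOURCE A (Python) =====
-- def _find_clean_start(text, start, latest_start):
--     window_start = max(0, start - 240)
--     window = text[window_start:latest_start]
--     candidates = [window.rfind(marker) for marker in ("\n\n", ". ", "! ", "? ")]
--     best = max(candidates)
--     if best != -1:
--         return window_start + best + 1
--     space = window.rfind(" ")
--     if space != -1:
--         return window_start + space + 1
--     return start
-- ===== SOURCE B (Python) =====
-- def _find_clean_start(text, start, latest_start):
--     # One forward pass over the window instead of five separate backward rfind scans.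
--     window_start = max(0, start - 240)
--     window = text[window_start:latest_start]
--     best_marker = -1
--     best_space = -1
--     n = len(window)
--     for i, ch in enumerate(window):
--         if ch == ' ':
--             best_space = i
--         if i + 1 < n:
--             nxt = window[i + 1]
--             if (ch == '\n' and nxt == '\n') or (ch in '.!?' and nxt == ' '):
--                 best_marker = i
--     if best_marker != -1:
--         return window_start + best_marker + 1
--     if best_space != -1:
--         return window_start + best_space + 1
--     return start
-- ===== Notes on version B (the rewrite author's own statement) =====
-- stated objective: alternative
-- what changed: A runs five separate backward rfind scans over the window (one per marker plus one for a space) and takes their maximum; B makes a single forward pass over the window, maintaining the last marker position and the last space position independently.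
import Mathlib
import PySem

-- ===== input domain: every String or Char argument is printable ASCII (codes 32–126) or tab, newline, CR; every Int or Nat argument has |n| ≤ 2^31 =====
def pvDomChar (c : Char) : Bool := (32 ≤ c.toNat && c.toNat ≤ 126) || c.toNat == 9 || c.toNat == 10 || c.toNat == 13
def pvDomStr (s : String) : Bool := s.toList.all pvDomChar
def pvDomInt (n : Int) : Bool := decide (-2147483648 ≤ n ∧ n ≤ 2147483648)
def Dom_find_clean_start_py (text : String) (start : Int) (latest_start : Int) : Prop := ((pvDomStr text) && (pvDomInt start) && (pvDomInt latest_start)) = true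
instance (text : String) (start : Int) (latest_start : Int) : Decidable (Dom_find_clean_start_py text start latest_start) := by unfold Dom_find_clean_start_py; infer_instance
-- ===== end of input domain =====

-- B replaces A's five separate backward rfind scans over the window by one forward pass
-- that maintains the last marker position and the last space position (objective: alternative).

-- ===== PORT A =====
def find_clean_start_py (text : String) (start : Int) (latest_start : Int) : Int :=
  let window_start : Int := max 0 (start - 240)
  let window : List Char := PySem.List.slice text.toList (some window_start) (some latest_start)
  let candidates : List Int :=
    [['\n','\n'], ['.',' '], ['!',' '], ['?',' ']].map (fun m => PySem.Chars.rfind window m)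
  let best : Int :=
    match PySem.List.max? candidates id with
    | some b => b
    | none => -1   -- unreachable: candidates always has four elements
  if best ≠ -1 then window_start + best + 1
  else
    let space := PySem.Chars.rfind window [' ']
    if space ≠ -1 then window_start + space + 1
    else start

-- ===== PORT B =====
def altIsMark (c d : Char) : Bool :=
  (c == '\n' && d == '\n') || ((c == '.' || c == '!' || c == '?') && d == ' ')

def altLoop : List Char → Int → Int → Int → Int × Int
  | [], _, bm, bs => (bm, bs)
  | c :: rest, i, bm, bs =>
      let bs' := if c == ' ' then i else bs
      let bm' := match rest with
        | d :: _ => if altIsMark c d then i else bm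
        | [] => bm
      altLoop rest (i + 1) bm' bs'

def find_clean_start_py_alt (text : String) (start : Int) (latest_start : Int) : Int :=
  let window_start : Int := max 0 (start - 240)
  let window : List Char := PySem.List.slice text.toList (some window_start) (some latest_start)
  let r := altLoop window 0 (-1) (-1)
  if r.1 ≠ -1 then window_start + r.1 + 1
  else if r.2 ≠ -1 then window_start + r.2 + 1
  else start

-- ===== PRECONDITION & SPEC =====
def Spec_find_clean_start_py (text : String) (start : Int) (latest_start : Int) (out : Int) : Prop := out = find_clean_start_py_alt text start latest_start
instance (text : String) (start : Int) (latest_start : Int) (out : Int) : Decidable (Spec_find_clean_start_py text start latest_start out) := by unfold Spec_find_clean_start_py; infer_instance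

-- ===== CLAIM (what is proved, stated in full; the proofs are below) =====
def Claim_equal_find_clean_start_py : Prop := ∀ (text : String) (start : Int) (latest_start : Int), Dom_find_clean_start_py text start latest_start → Spec_find_clean_start_py text start latest_start (find_clean_start_py text start latest_start)

-- ===== LEMMAS AND PROOFS =====

-- the largest j < n with p j, else -1 (common spec of rfind and of B's forward maxima)
def lastP (p : Nat → Bool) : Nat → Int
  | 0 => -1
  | n+1 => if p n then (n : Int) else lastP p n

theorem lastP_le (p : Nat → Bool) (n : Nat) : lastP p n ≤ (n : Int) - 1 := by
  induction n with
  | zero => simp [lastP]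
  | succ n ih => simp only [lastP]; split_ifs <;> push_cast <;> omega

theorem neg_one_le_lastP (p : Nat → Bool) (n : Nat) : -1 ≤ lastP p n := by
  induction n with
  | zero => simp [lastP]
  | succ n ih => simp only [lastP]; split_ifs <;> omega

theorem lastP_congr (p q : Nat → Bool) (n : Nat) (h : ∀ j, j < n → p j = q j) :
    lastP p n = lastP q n := by
  induction n with
  | zero => rfl
  | succ n ih =>
      simp only [lastP, h n (Nat.lt_succ_self n)]
      rw [ih (fun j hj => h j (Nat.lt_succ_of_lt hj))]

theorem lastP_max (p q : Nat → Bool) (n : Nat) :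
    max (lastP p n) (lastP q n) = lastP (fun j => p j || q j) n := by
  induction n with
  | zero => simp [lastP]
  | succ n ih =>
      have h1 := lastP_le p n
      have h2 := lastP_le q n
      simp only [lastP]
      rw [← ih]
      split_ifs <;> simp_all <;> omega

theorem rfind_go_eq (s sub : List Char) (j : Nat) :
    PySem.Chars.rfind.go s sub j = lastP (fun i => sub.isPrefixOf (s.drop i)) (j+1) := by
  induction j with
  | zero => simp [PySem.Chars.rfind.go, lastP]
  | succ j ih => simp [PySem.Chars.rfind.go, lastP, ih]

theorem rfind_eq_lastP (s sub : List Char) (hsub : sub ≠ []) :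
    PySem.Chars.rfind s sub = lastP (fun i => sub.isPrefixOf (s.drop i)) s.length := by
  rw [PySem.Chars.rfind, rfind_go_eq]
  simp only [lastP, List.drop_length]
  cases sub with
  | nil => exact absurd rfl hsub
  | cons c t => simp [List.isPrefixOf]

-- predicates B's forward pass tracks
def pMark (cs : List Char) (j : Nat) : Bool :=
  match cs.drop j with
  | c :: d :: _ => altIsMark c d
  | _ => false

def pSpace (cs : List Char) (j : Nat) : Bool :=
  match cs.drop j with
  | c :: _ => c == ' '
  | _ => false

theorem lastP_shift (p q : Nat → Bool) (h : ∀ j, q (j+1) = p j) (n : Nat) :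
    lastP q (n+1) = if lastP p n = -1 then (if q 0 then (0:Int) else -1) else lastP p n + 1 := by
  induction n with
  | zero => simp [lastP]
  | succ n ih =>
      have hle := lastP_le p n
      have hge := neg_one_le_lastP p n
      simp only [lastP] at *
      rw [h n]
      cases hp : p n <;> simp [ih]

theorem altLoop_eq (cs : List Char) (i bm bs : Int) :
    altLoop cs i bm bs =
      ((if lastP (pMark cs) cs.length = -1 then bm else i + lastP (pMark cs) cs.length),
       (if lastP (pSpace cs) cs.length = -1 then bs else i + lastP (pSpace cs) cs.length)) := by
  induction cs generalizing i bm bs with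
  | nil => simp [altLoop, lastP]
  | cons c rest ih =>
      have hms : ∀ j, pMark (c :: rest) (j+1) = pMark rest j := by
        intro j; simp [pMark]
      have hss : ∀ j, pSpace (c :: rest) (j+1) = pSpace rest j := by
        intro j; simp [pSpace]
      have hgem := neg_one_le_lastP (pMark rest) rest.length
      have hges := neg_one_le_lastP (pSpace rest) rest.length
      simp only [altLoop, ih, List.length_cons,
        lastP_shift (pMark rest) (pMark (c :: rest)) hms rest.length,
        lastP_shift (pSpace rest) (pSpace (c :: rest)) hss rest.length]
      rw [Prod.mk.injEq]
      refine ⟨?_, ?_⟩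
      · cases rest with
        | nil => simp [pMark, lastP]
        | cons d t =>
            have hp : pMark (c :: d :: t) 0 = altIsMark c d := rfl
            rw [hp]
            cases hm : altIsMark c d <;> split_ifs <;> simp_all <;> omega
      · have hp : pSpace (c :: rest) 0 = (c == ' ') := rfl
        rw [hp]
        cases hc : c == ' ' <;> split_ifs <;> simp_all <;> omega

theorem max?_four (a b c d : Int) :
    PySem.List.max? [a,b,c,d] id = some (max (max (max a b) c) d) := by
  simp only [PySem.List.max?, List.foldl, id]
  split_ifs <;> simp only [] <;> split_ifs <;> simp only [] <;> split_ifs <;> (congr 1; omega)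

theorem pAll_eq_pMark (cs : List Char) (j : Nat) :
    (((['\n','\n'].isPrefixOf (cs.drop j) || ['.',' '].isPrefixOf (cs.drop j)) ||
       ['!',' '].isPrefixOf (cs.drop j)) || ['?',' '].isPrefixOf (cs.drop j)) = pMark cs j := by
  rcases h : cs.drop j with _ | ⟨c, _ | ⟨d, t⟩⟩
  · simp [pMark, h, List.isPrefixOf]
  · simp [pMark, h, List.isPrefixOf]
  · simp only [pMark, h, altIsMark, List.isPrefixOf, Bool.and_true]
    rw [BEq.comm (a := '\n') (b := c), BEq.comm (a := '.') (b := c), BEq.comm (a := '!') (b := c),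
      BEq.comm (a := '?') (b := c), BEq.comm (a := '\n') (b := d), BEq.comm (a := ' ') (b := d)]
    cases c == '\n' <;> cases c == '.' <;> cases c == '!' <;>
      cases c == '?' <;> cases d == '\n' <;> cases d == ' ' <;> rfl

theorem pSp_eq_pSpace (cs : List Char) (j : Nat) :
    [' '].isPrefixOf (cs.drop j) = pSpace cs j := by
  rcases h : cs.drop j with _ | ⟨c, t⟩
  · simp [pSpace, h, List.isPrefixOf]
  · simp only [pSpace, h, List.isPrefixOf, Bool.and_true]
    rw [BEq.comm (a := ' ') (b := c)]

-- ===== VERDICT (by name: the statement is the Claim_ definition above) =====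
theorem find_clean_start_py_spec : Claim_equal_find_clean_start_py := by
  intro text start latest_start _
  unfold Spec_find_clean_start_py find_clean_start_py find_clean_start_py_alt
  simp only [List.map]
  set w : List Char := PySem.List.slice text.toList (some (max 0 (start - 240))) (some latest_start) with hw
  rw [max?_four,
    rfind_eq_lastP w ['\n','\n'] (by simp), rfind_eq_lastP w ['.',' '] (by simp),
    rfind_eq_lastP w ['!',' '] (by simp), rfind_eq_lastP w ['?',' '] (by simp),
    rfind_eq_lastP w [' '] (by simp),
    lastP_max, lastP_max, lastP_max,
    lastP_congr _ (pMark w) w.length (fun j _ => pAll_eq_pMark w j),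
    lastP_congr _ (pSpace w) w.length (fun j _ => pSp_eq_pSpace w j),
    altLoop_eq]
  have hgm := neg_one_le_lastP (pMark w) w.length
  have hgs := neg_one_le_lastP (pSpace w) w.length
  split_ifs <;> simp_all
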